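-- pv_equiv track=rewrite | github.com/DangMTri23521636/Demo_Github | Fuction.py | count_min_digits
-- ===== SOURCE A (Python) =====
-- def count_min_digits(n):
--     a = abs(n)
--     count = 0
--     min_digit = a % 10
--     while (a!=0):
--         if (a%10<min_digit):
--             min_digit = a% 10
--             count = 1
--         elif (a%10==min_digit):
--             count += 1
--         a//=10
--     return count
-- ===== SOURCE B (Python) =====
-- def count_min_digits(n):
--     a = abs(n)
--     digits = []
--     while a != 0:
--         digits.append(a % 10)
--         a //= 10
--     if not digits:
--         return 0
--     return digits.count(min(digits))
-- ===== Notes on version B (the rewrite author's own statement) =====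
-- stated objective: simpler
-- what changed: Replaces A's fused single pass that tracks the running minimum and its count together with a build-then-scan decomposition: peel the digits into a list, then return digits.count(min(digits)).
import Mathlib
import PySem

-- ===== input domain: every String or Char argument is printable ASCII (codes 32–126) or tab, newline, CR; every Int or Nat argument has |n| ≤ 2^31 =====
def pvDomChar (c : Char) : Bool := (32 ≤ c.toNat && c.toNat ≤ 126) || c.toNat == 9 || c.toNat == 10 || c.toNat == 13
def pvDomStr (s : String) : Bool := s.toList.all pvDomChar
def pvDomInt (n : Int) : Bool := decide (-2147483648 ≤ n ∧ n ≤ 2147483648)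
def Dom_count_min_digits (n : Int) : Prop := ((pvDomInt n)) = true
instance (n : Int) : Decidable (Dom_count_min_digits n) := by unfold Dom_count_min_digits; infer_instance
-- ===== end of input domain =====

-- B replaces A's fused min-and-count single pass by a build-then-scan decomposition
-- (peel the digit list, then digits.count(min(digits))); objective: simpler. No speed claim.

-- ===== PORT A =====
-- A's while loop over a = abs(n) (a is nonnegative throughout, so Nat division = Python's //)
def pvLoopA (a : Nat) (count : Int) (min_digit : Int) : Int :=
  if a ≠ 0 then
    if ((a % 10 : Nat) : Int) < min_digit then pvLoopA (a / 10) 1 ((a % 10 : Nat) : Int)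
    else if ((a % 10 : Nat) : Int) = min_digit then pvLoopA (a / 10) (count + 1) min_digit
    else pvLoopA (a / 10) count min_digit
  else count
decreasing_by all_goals exact Nat.div_lt_self (Nat.pos_of_ne_zero (by assumption)) (by norm_num)

def count_min_digits (n : Int) : Int :=
  pvLoopA n.natAbs 0 ((n.natAbs % 10 : Nat) : Int)

-- ===== PORT B =====
-- the digit-peeling loop of Source B (appending a%10 then a //= 10 builds the same list as this recursion)
def pvDigits (a : Nat) : List Int :=
  if a = 0 then [] else ((a % 10 : Nat) : Int) :: pvDigits (a / 10)
decreasing_by exact Nat.div_lt_self (Nat.pos_of_ne_zero (by assumption)) (by norm_num)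

def count_min_digits_alt (n : Int) : Int :=
  let digits := pvDigits n.natAbs
  if digits = [] then 0
  else ((digits.count ((PySem.List.min? digits (fun x => x)).getD 0) : Nat) : Int)

-- ===== PRECONDITION & SPEC =====
def Spec_count_min_digits (n : Int) (out : Int) : Prop := out = count_min_digits_alt n
instance (n : Int) (out : Int) : Decidable (Spec_count_min_digits n out) := by unfold Spec_count_min_digits; infer_instance

-- ===== CLAIM (what is proved, stated in full; the proofs are below) =====
def Claim_equal_count_min_digits : Prop := ∀ (n : Int), Dom_count_min_digits n → Spec_count_min_digits n (count_min_digits n)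

-- ===== LEMMAS AND PROOFS =====

-- A's loop re-expressed over the digit list
def pvG : List Int → Int → Int → Int
  | [], c, _ => c
  | d :: ds, c, md =>
    if d < md then pvG ds 1 d
    else if d = md then pvG ds (c + 1) md
    else pvG ds c md

theorem pvLoopA_eq_G (a : Nat) : ∀ c md, pvLoopA a c md = pvG (pvDigits a) c md := by
  induction a using Nat.strong_induction_on with
  | _ a ih =>
    intro c md
    by_cases h : a = 0
    · subst h; simp [pvLoopA, pvDigits, pvG]
    · rw [pvLoopA, pvDigits, if_pos h, if_neg h]
      have hd : a / 10 < a := Nat.div_lt_self (Nat.pos_of_ne_zero h) (by norm_num)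
      simp only [pvG]
      split_ifs <;> exact ih _ hd _ _

theorem pvG_spec (ds : List Int) : ∀ c md,
    pvG ds c md =
      if ds.foldl min md = md then c + ((ds.count md : Nat) : Int)
      else ((ds.count (ds.foldl min md) : Nat) : Int) := by
  induction ds with
  | nil => intro c md; simp [pvG]
  | cons d ds ih =>
    intro c md
    have hmem : ∀ (x : Int) (l : List Int), l.foldl min x ≤ x := by
      intro x l
      induction l generalizing x with
      | nil => simp
      | cons y l ihl => simpa using le_trans (ihl (min x y)) (min_le_left _ _)
    simp only [pvG, List.foldl_cons]
    by_cases h1 : d < md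
    · rw [if_pos h1, min_eq_right h1.le, ih 1 d]
      have hne : ds.foldl min d ≠ md := fun he => absurd (he ▸ hmem d ds) (not_le.mpr h1)
      rw [if_neg hne]
      by_cases hm : ds.foldl min d = d
      · rw [if_pos hm, hm, List.count_cons_self]; push_cast; ring
      · have h3 := hmem d ds
        rw [if_neg hm, List.count_cons_of_ne (by omega)]
    · by_cases h2 : d = md
      · rw [if_neg h1, if_pos h2, h2, min_self, ih (c + 1) md]
        by_cases hm : ds.foldl min md = md
        · rw [if_pos hm, if_pos hm, List.count_cons_self]; push_cast; ring
        · rw [if_neg hm, if_neg hm, List.count_cons_of_ne (fun he => hm he.symm)]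
      · have hgt : md < d := lt_of_le_of_ne (not_lt.mp h1) (Ne.symm h2)
        rw [if_neg h1, if_neg h2, min_eq_left hgt.le, ih c md]
        by_cases hm : ds.foldl min md = md
        · rw [if_pos hm, if_pos hm,
            List.count_cons_of_ne h2]
        · have hlt : ds.foldl min md < md := lt_of_le_of_ne (hmem md ds) hm
          rw [if_neg hm, if_neg hm, List.count_cons_of_ne (by omega)]

-- ===== VERDICT (by name: the statement is the Claim_ definition above) =====
theorem count_min_digits_spec : Claim_equal_count_min_digits := by
  unfold Claim_equal_count_min_digits
  intro n _
  unfold Spec_count_min_digits count_min_digits count_min_digits_alt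
  by_cases h : n.natAbs = 0
  · simp [h, pvDigits, pvLoopA]
  · rw [pvLoopA_eq_G]
    rw [pvDigits, if_neg h]
    set d : Int := ((n.natAbs % 10 : Nat) : Int) with hd
    set ds := pvDigits (n.natAbs / 10) with hds
    rw [pvG_spec]
    simp only [List.foldl_cons, min_self]
    rw [PySem.List.min?_id_cons]
    rw [if_neg (by simp : d :: ds ≠ [])]
    by_cases hm : ds.foldl min d = d
    · simp [hm]
    · simp [hm]
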